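-- pv_equiv track=rewrite | github.com/GaniyuAdebayo/Semicolon-Python-Tasks | Home Snack/home_snack.py | sum_of_elements_at_even_positions
-- ===== SOURCE A (Python) =====
-- def sum_of_elements_at_even_positions(numbers):
--
-- 	total = 0
-- 	count = 1
-- 	for value in numbers:
-- 		if (count % 2 == 0):
-- 			total += value
-- 		count += 1
-- 	return total
-- ===== SOURCE B (Python) =====
-- def sum_of_elements_at_even_positions(numbers):
--     return sum(numbers[1::2])
-- ===== Notes on version B (the rewrite author's own statement) =====
-- stated objective: idiomatic
-- what changed: Replaces the explicit counter-and-parity accumulation loop with a stride slice numbers[1::2] summed by the built-in sum.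
import Mathlib
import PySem

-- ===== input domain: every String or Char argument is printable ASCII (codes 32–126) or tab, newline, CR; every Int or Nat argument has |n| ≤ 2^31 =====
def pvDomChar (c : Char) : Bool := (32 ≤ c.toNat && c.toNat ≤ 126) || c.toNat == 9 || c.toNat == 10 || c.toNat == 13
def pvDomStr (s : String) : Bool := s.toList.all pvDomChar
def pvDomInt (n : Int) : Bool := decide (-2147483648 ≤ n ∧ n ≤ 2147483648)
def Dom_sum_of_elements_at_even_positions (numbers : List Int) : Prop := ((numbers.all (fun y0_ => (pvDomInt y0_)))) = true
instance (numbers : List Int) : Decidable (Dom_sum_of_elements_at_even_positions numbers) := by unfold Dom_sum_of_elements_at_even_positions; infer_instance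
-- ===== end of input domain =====

-- ===== PORT A =====
-- total = 0; count = 1; for value in numbers: if count % 2 == 0: total += value; count += 1; return total
def sum_of_elements_at_even_positions (numbers : List Int) : Int :=
  (numbers.foldl
    (fun (st : Int × Int) value =>
      let total := if PySem.Int.mod st.2 2 == 0 then st.1 + value else st.1
      (total, st.2 + 1))
    (0, 1)).1

-- ===== PORT B =====
-- return sum(numbers[1::2])  (the step is the literal 2 ≠ 0, so slice? is always some)
def sum_of_elements_at_even_positions_alt (numbers : List Int) : Int :=
  ((PySem.List.slice? numbers (some 1) none 2).getD []).sum

-- ===== PRECONDITION & SPEC =====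
def Spec_sum_of_elements_at_even_positions (numbers : List Int) (out : Int) : Prop := out = sum_of_elements_at_even_positions_alt numbers
instance (numbers : List Int) (out : Int) : Decidable (Spec_sum_of_elements_at_even_positions numbers out) := by unfold Spec_sum_of_elements_at_even_positions; infer_instance

-- ===== CLAIM (what is proved, stated in full; the proofs are below) =====
def Claim_equal_sum_of_elements_at_even_positions : Prop := ∀ (numbers : List Int), Dom_sum_of_elements_at_even_positions numbers → Spec_sum_of_elements_at_even_positions numbers (sum_of_elements_at_even_positions numbers)

-- ===== LEMMAS AND PROOFS =====

-- the elements of xs at odd 0-based indices (= even 1-based positions)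
def oddIdx : List Int → List Int
  | _ :: y :: r => y :: oddIdx r
  | _ => []

theorem aux (xs : List Int) :
    (List.range (xs.length/2)).filterMap (fun k => xs[1+2*k]?) = oddIdx xs := by
  induction xs using oddIdx.induct with
  | case1 x y r ih =>
      have hlen : (x :: y :: r).length / 2 = r.length / 2 + 1 := by simp; omega
      rw [hlen, List.range_succ_eq_map]
      simp only [List.filterMap_cons, List.filterMap_map]
      have h0 : (x :: y :: r)[1+2*0]? = some y := by simp
      have hs : ∀ k : ℕ, (x :: y :: r)[1+2*(Nat.succ k)]? = r[1+2*k]? := by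
        intro k
        have : 1+2*(Nat.succ k) = ((1+2*k)+1)+1 := by omega
        rw [this]; simp
      simp only [h0, Function.comp]
      rw [List.filterMap_congr (fun k _ => hs k), ih, oddIdx]
  | case2 xs h =>
      match xs, h with
      | [], _ => simp [oddIdx]
      | [x], _ => simp [oddIdx]
      | x :: y :: r, h => exact absurd rfl (h x y r)

theorem slice?_one_two (xs : List Int) :
    PySem.List.slice? xs (some 1) none 2 = some (oddIdx xs) := by
  cases xs with
  | nil => decide
  | cons a l =>
      rw [← aux]
      simp only [PySem.List.slice?, PySem.List.sliceIndices]
      norm_num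
      have hc : (if 0 < l.length then (((l.length:ℤ) + 2 - 1) / 2).toNat else 0)
          = (l.length + 1) / 2 := by
        split_ifs with h <;> omega
      rw [hc]
      exact List.filterMap_congr (fun k _ => by
        have : ((1:ℤ) + 2 * (k:ℕ)).toNat = 1 + 2 * k := by omega
        rw [this])

theorem foldl_odd (xs : List Int) (t c : Int) (hc : PySem.Int.mod c 2 = 1) :
    (xs.foldl
      (fun (st : Int × Int) value =>
        let total := if PySem.Int.mod st.2 2 == 0 then st.1 + value else st.1
        (total, st.2 + 1))
      (t, c)).1 = t + (oddIdx xs).sum := by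
  induction xs using oddIdx.induct generalizing t c with
  | case1 x y r ih =>
      have h1 : (PySem.Int.mod c 2 == 0) = false := by
        simp only [PySem.Int.mod, Int.fmod_eq_emod] at hc ⊢
        simp; omega
      have h2 : (PySem.Int.mod (c+1) 2 == 0) = true := by
        simp only [PySem.Int.mod, Int.fmod_eq_emod] at hc ⊢
        simp; omega
      have h3 : PySem.Int.mod (c+1+1) 2 = 1 := by
        simp only [PySem.Int.mod, Int.fmod_eq_emod] at hc ⊢
        omega
      simp only [List.foldl_cons, h1, h2, Bool.false_eq_true, if_true, if_false]
      rw [ih (t + y) (c+1+1) h3, oddIdx]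
      simp; ring
  | case2 xs h =>
      match xs, h with
      | [], _ => simp [oddIdx]
      | [x], _ =>
          have h1 : (PySem.Int.mod c 2 == 0) = false := by
            simp only [PySem.Int.mod, Int.fmod_eq_emod] at hc ⊢
            simp; omega
          simp only [List.foldl_cons, h1]
          simp [oddIdx]
      | x :: y :: r, h => exact absurd rfl (h x y r)

theorem sum_of_elements_at_even_positions_spec : Claim_equal_sum_of_elements_at_even_positions := by
  intro numbers _
  unfold Spec_sum_of_elements_at_even_positions sum_of_elements_at_even_positions sum_of_elements_at_even_positions_alt
  rw [slice?_one_two, foldl_odd numbers 0 1 (by decide)]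
  simp
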